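-- pv_equiv track=rewrite | github.com/Hyojeong721/TIL | SWA/0825/gudtjs0428/1225_암호생성기/s1.py | create_password
-- ===== SOURCE A (Python) =====
-- def create_password(q):
--     i = [1, 2, 3, 4, 5]
--     while q[0] - i[0] > 0:
--         q.append(q.pop(0) - i[0])
--         i.append(i.pop(0))
--     q.pop(0)
--     q.append(0)
--     return q
-- ===== SOURCE B (Python) =====
-- def create_password(q):
--     # Pass-based simulation: subtract a whole round of decrements at once
--     # (decrement for slot j in the pass starting at step c is (c+j)%5+1),
--     # instead of rotating the queue one element at a time with O(n) pops.
--     # Note: A mutates q in place; B only reads it (return value equivalence).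
--     vals = list(q)
--     n = len(vals)
--     c = 0
--     while True:
--         decs = [(c + j) % 5 + 1 for j in range(n)]
--         if all(v > d for v, d in zip(vals, decs)):
--             vals = [v - d for v, d in zip(vals, decs)]
--             c += n
--         else:
--             done = []
--             k = 0
--             while vals[k] > decs[k]:
--                 done.append(vals[k] - decs[k])
--                 k += 1
--             return vals[k + 1:] + done + [0]
-- ===== Notes on version B (the rewrite author's own statement) =====
-- stated objective: alternative
-- what changed: B replaces A's one-element-at-a-time queue rotation (pop(0)/append per subtraction step) by whole-pass simulation: each iteration subtracts the full round of cyclic decrements from every element at once and only the final failing pass is walked element by element; B also does not mutate its argument.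
import Mathlib
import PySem

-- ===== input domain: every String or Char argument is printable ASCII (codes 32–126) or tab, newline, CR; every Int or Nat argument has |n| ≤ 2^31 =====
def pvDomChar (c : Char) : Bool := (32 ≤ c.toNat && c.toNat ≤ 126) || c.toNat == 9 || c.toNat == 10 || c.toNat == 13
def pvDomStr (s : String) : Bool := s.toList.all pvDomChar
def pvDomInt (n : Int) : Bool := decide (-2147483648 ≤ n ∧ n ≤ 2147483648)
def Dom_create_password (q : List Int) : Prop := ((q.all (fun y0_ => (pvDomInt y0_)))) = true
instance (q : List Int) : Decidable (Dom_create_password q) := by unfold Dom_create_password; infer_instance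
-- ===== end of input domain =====

-- B computes the same password queue by whole passes (one vectorized decrement
-- round per pass) instead of rotating the queue one pop(0)/append at a time;
-- A mutates its argument in place, B does not: the claim is about return values.

-- Both loops recurse on a fuel bound that provably dominates the number of
-- iterations (every iteration strictly decreases pvSumPos): a totality device
-- only, the branch taken at fuel 0 is never reached from the entry points.
def pvSumPos (q : List Int) : Nat := (q.map Int.toNat).sum

-- ===== PORT A =====
-- the while loop of A: front element minus front decrement goes to the back
def aLoop : Nat → List Int → List Int → List Int
  | 0, q, _ => q                      -- fuel exhausted: never reached (fuel below suffices)
  | _ + 1, [], _ => []                -- unreachable under Pre_: Python raises IndexError on empty q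
  | _ + 1, a :: qs, [] => a :: qs     -- unreachable: i is never empty
  | f + 1, a :: qs, d :: ds =>
    if a - d > 0 then aLoop f (qs ++ [a - d]) (ds ++ [d]) else a :: qs

def create_password (q : List Int) : List Int :=
  match aLoop (pvSumPos q + 1) q [1, 2, 3, 4, 5] with
  | [] => []                          -- unreachable under Pre_ (the loop preserves q ≠ [])
  | _ :: rest => rest ++ [0]          -- q.pop(0); q.append(0)

-- ===== PORT B =====
-- decrement of the step-counter value c: (c % 5) + 1
def pvDec (c : Nat) : Int := ((c % 5 : Nat) : Int) + 1

-- decs = [(c + j) % 5 + 1 for j in range(n)]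
def bDecs (n c : Nat) : List Int := (List.range n).map (fun j => pvDec (c + j))

-- all(v > d for v, d in zip(vals, decs))
def bSafe (vals : List Int) (c : Nat) : Bool :=
  (vals.zip (bDecs vals.length c)).all (fun p => decide (p.2 < p.1))

-- the final (failing) pass: walk the safe prefix, accumulate it in `done`
def bFinish : List Int → List Int → List Int → List Int
  | v :: vs, d :: ds, done =>
      if v > d then bFinish vs ds (done ++ [v - d]) else vs ++ done ++ [0]
  | _, _, done => done ++ [0]         -- unreachable: this pass contains a failing element

-- the pass loop of B
def bLoop : Nat → List Int → Nat → List Int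
  | 0, vals, _ => vals                -- fuel exhausted: never reached (fuel below suffices)
  | _ + 1, [], _ => []                -- unreachable under Pre_: Python loops forever on empty input
  | f + 1, v :: vs, c =>
    if bSafe (v :: vs) c then
      bLoop f (List.zipWith (· - ·) (v :: vs) (bDecs (v :: vs).length c)) (c + (v :: vs).length)
    else
      bFinish (v :: vs) (bDecs (v :: vs).length c) []

def create_password_alt (q : List Int) : List Int := bLoop (pvSumPos q + 1) q 0

-- ===== PRECONDITION & SPEC =====
-- Pre_ excludes only the empty list, on which A raises IndexError (q[0]).
def Pre_create_password (q : List Int) : Prop := q ≠ []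
instance (q : List Int) : Decidable (Pre_create_password q) := by unfold Pre_create_password; infer_instance
def pvWitness_create_password : List Int := [3, 7]

def Spec_create_password (q : List Int) (out : List Int) : Prop := out = create_password_alt q
instance (q : List Int) (out : List Int) : Decidable (Spec_create_password q out) := by unfold Spec_create_password; infer_instance

-- ===== CLAIM (what is proved, stated in full; the proofs are below) =====
def Claim_equal_create_password : Prop := ∀ (q : List Int), Dom_create_password q → Pre_create_password q → Spec_create_password q (create_password q)

-- ===== LEMMAS AND PROOFS =====

-- the rotation of [1,2,3,4,5] after c steps
def rot (c : Nat) : List Int :=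
  [pvDec c, pvDec (c + 1), pvDec (c + 2), pvDec (c + 3), pvDec (c + 4)]

theorem pvDec_ge_one (c : Nat) : (1:Int) ≤ pvDec c := by unfold pvDec; omega

theorem pvDec_add_five (c : Nat) : pvDec (c + 5) = pvDec c := by
  unfold pvDec; rw [Nat.add_mod_right]

theorem rot_rotate (c : Nat) :
    [pvDec (c+1), pvDec (c+2), pvDec (c+3), pvDec (c+4)] ++ [pvDec c] = rot (c + 1) := by
  unfold rot
  have e1 : c + 1 + 1 = c + 2 := by omega
  have e2 : c + 1 + 2 = c + 3 := by omega
  have e3 : c + 1 + 3 = c + 4 := by omega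
  have e4 : c + 1 + 4 = c + 5 := by omega
  rw [e1, e2, e3, e4, pvDec_add_five]
  rfl

theorem rot_zero : rot 0 = [1, 2, 3, 4, 5] := by decide

theorem bDecs_cons (n c : Nat) :
    bDecs (n + 1) c = pvDec c :: bDecs n (c + 1) := by
  unfold bDecs
  rw [List.range_succ_eq_map, List.map_cons, List.map_map]
  refine congrArg₂ List.cons (by norm_num) ?_
  apply List.map_congr_left
  intro j _
  simp only [Function.comp_apply]
  congr 1
  omega

theorem bSafe_cons (v : Int) (vs : List Int) (c : Nat) :
    bSafe (v :: vs) c = ((decide (pvDec c < v)) && bSafe vs (c + 1)) := by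
  unfold bSafe
  rw [show (v :: vs).length = vs.length + 1 from rfl, bDecs_cons]
  simp

-- a safe pass removes at least 1 from the positive part of every element
theorem sub_measure : ∀ (vs : List Int) (c : Nat), bSafe vs c = true →
    pvSumPos (List.zipWith (· - ·) vs (bDecs vs.length c)) + vs.length ≤ pvSumPos vs := by
  intro vs
  induction vs with
  | nil => intro c _; simp [pvSumPos, bDecs]
  | cons v vs ih =>
    intro c hs
    rw [bSafe_cons] at hs
    simp only [Bool.and_eq_true, decide_eq_true_eq] at hs
    have h1 := ih (c + 1) hs.2
    have h2 := pvDec_ge_one c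
    rw [show (v :: vs).length = vs.length + 1 from rfl, bDecs_cons]
    simp only [List.zipWith_cons_cons, pvSumPos, List.map_cons, List.sum_cons] at *
    omega

theorem aLoop_ne_nil : ∀ (f : Nat) (q i : List Int), q ≠ [] → aLoop f q i ≠ [] := by
  intro f
  induction f with
  | zero => intro q i hq; simpa [aLoop] using hq
  | succ f ih =>
    intro q i hq
    match q, i with
    | a :: qs, [] => simp [aLoop]
    | a :: qs, d :: ds =>
      rw [aLoop]
      split
      · exact ih (qs ++ [a - d]) (ds ++ [d]) (by simp)
      · simp

-- one full safe pass of A equals the vectorized subtraction of B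
theorem pass_lemma : ∀ (u : List Int) (c : Nat) (w : List Int) (f : Nat),
    bSafe u c = true →
    aLoop (f + u.length) (u ++ w) (rot c)
      = aLoop f (w ++ List.zipWith (· - ·) u (bDecs u.length c)) (rot (c + u.length)) := by
  intro u
  induction u with
  | nil => intro c w f _; simp [bDecs]
  | cons a us ih =>
    intro c w f hs
    rw [bSafe_cons] at hs
    simp only [Bool.and_eq_true, decide_eq_true_eq] at hs
    have hstep : aLoop (f + (a :: us).length) ((a :: us) ++ w) (rot c)
        = aLoop (f + us.length) (us ++ (w ++ [a - pvDec c])) (rot (c + 1)) := by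
      show aLoop ((f + us.length) + 1) (a :: (us ++ w))
            (pvDec c :: [pvDec (c+1), pvDec (c+2), pvDec (c+3), pvDec (c+4)]) = _
      rw [aLoop]
      rw [if_pos (by omega : a - pvDec c > 0)]
      rw [rot_rotate c]
      congr 1
      simp
    rw [hstep, ih (c + 1) (w ++ [a - pvDec c]) f hs.2]
    rw [show (a :: us).length = us.length + 1 from rfl, bDecs_cons]
    congr 1
    · simp
    · congr 1; omega

-- the failing pass: A's remaining single steps match B's bFinish walk
theorem finish_lemma : ∀ (vs : List Int) (c : Nat) (acc : List Int) (f : Nat),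
    bSafe vs c = false → pvSumPos vs < f →
    (aLoop f (vs ++ acc) (rot c)).tail ++ [0] = bFinish vs (bDecs vs.length c) acc := by
  intro vs
  induction vs with
  | nil => intro c acc f h _; simp [bSafe, bDecs] at h
  | cons a us ih =>
    intro c acc f hs hf
    rw [bSafe_cons] at hs
    rw [show (a :: us).length = us.length + 1 from rfl, bDecs_cons]
    obtain ⟨f', rfl⟩ : ∃ f', f = f' + 1 := ⟨f - 1, by omega⟩
    by_cases hc : pvDec c < a
    · -- head safe: one more queue step, recurse
      simp only [hc, decide_true, Bool.true_and] at hs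
      have hstep : aLoop (f' + 1) ((a :: us) ++ acc) (rot c)
          = aLoop f' (us ++ (acc ++ [a - pvDec c])) (rot (c + 1)) := by
        show aLoop (f' + 1) (a :: (us ++ acc))
              (pvDec c :: [pvDec (c+1), pvDec (c+2), pvDec (c+3), pvDec (c+4)]) = _
        rw [aLoop]
        rw [if_pos (by omega : a - pvDec c > 0)]
        rw [rot_rotate c]
        congr 1
        simp
      have hf' : pvSumPos us < f' := by
        have h2 := pvDec_ge_one c
        simp only [pvSumPos, List.map_cons, List.sum_cons] at hf ⊢
        omega
      rw [hstep, ih (c + 1) (acc ++ [a - pvDec c]) f' hs hf']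
      rw [bFinish]
      simp only [if_pos hc]
    · -- head fails: both terminate here
      have hstop : aLoop (f' + 1) ((a :: us) ++ acc) (rot c) = a :: (us ++ acc) := by
        show aLoop (f' + 1) (a :: (us ++ acc))
              (pvDec c :: [pvDec (c+1), pvDec (c+2), pvDec (c+3), pvDec (c+4)]) = _
        rw [aLoop]
        rw [if_neg (by omega : ¬(a - pvDec c > 0))]
      rw [hstop, bFinish]
      simp only [if_neg hc]
      simp

theorem main_lemma : ∀ (N : Nat) (q : List Int) (c fa fb : Nat),
    pvSumPos q ≤ N → q ≠ [] → pvSumPos q < fa → pvSumPos q < fb →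
    (aLoop fa q (rot c)).tail ++ [0] = bLoop fb q c := by
  intro N
  induction N using Nat.strong_induction_on with
  | _ N ih =>
    intro q c fa fb hN hq hfa hfb
    obtain ⟨fb', rfl⟩ : ∃ fb', fb = fb' + 1 := ⟨fb - 1, by omega⟩
    match q with
    | v :: vs =>
      rw [bLoop]
      by_cases hs : bSafe (v :: vs) c
      · simp only [if_pos hs]
        set q' := List.zipWith (· - ·) (v :: vs) (bDecs (v :: vs).length c) with hq'
        have hmeas : pvSumPos q' + (v :: vs).length ≤ pvSumPos (v :: vs) :=
          sub_measure (v :: vs) c hs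
        have hlen : (v :: vs).length ≤ fa := by simp at hmeas ⊢; omega
        have hpass := pass_lemma (v :: vs) c [] (fa - (v :: vs).length) hs
        simp only [List.append_nil, List.nil_append] at hpass
        rw [show fa = (fa - (v :: vs).length) + (v :: vs).length from by omega, hpass]
        have hne : q' ≠ [] := by
          rw [hq', show (v :: vs).length = vs.length + 1 from rfl, bDecs_cons]
          simp
        have hlt : pvSumPos q' < pvSumPos (v :: vs) := by
          simp only [List.length_cons] at hmeas; omega
        cases N with
        | zero => omega
        | succ N' =>
          exact ih N' (by omega) q' (c + (v :: vs).length)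
            (fa - (v :: vs).length) fb' (by omega) hne
            (by simp only [List.length_cons] at hmeas ⊢; omega) (by omega)
      · simp only [if_neg hs]
        have hfin := finish_lemma (v :: vs) c [] fa (by simpa using hs) hfa
        simpa using hfin

-- ===== VERDICT (by name: the statement is the Claim_ definition above) =====
theorem create_password_spec : Claim_equal_create_password := by
  intro q _ hq
  unfold Spec_create_password create_password create_password_alt
  rw [show ([1,2,3,4,5] : List Int) = rot 0 from rot_zero.symm]
  have hmain := main_lemma (pvSumPos q) q 0 (pvSumPos q + 1) (pvSumPos q + 1)
    (le_refl _) hq (by omega) (by omega)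
  have hne := aLoop_ne_nil (pvSumPos q + 1) q (rot 0) hq
  match hres : aLoop (pvSumPos q + 1) q (rot 0) with
  | [] => exact absurd hres hne
  | x :: rest =>
    rw [hres] at hmain
    simpa using hmain
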